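-- pv_equiv track=rewrite | github.com/Shinigami0Hacker/SpringCapstone2025 | test2.py | ordered_column_permutation
-- ===== SOURCE A (Python) =====
-- import itertools
--
-- def ordered_column_permutation(columns):
--     """
--     Only match when column are spoken in order
--     @Output:
--     - list[Tuple[Tuple[match_word, index]]]
--     """
--     result = []
--     indexed_lst = list(enumerate(columns))
--     for r in range(1, len(columns)+1):
--         for comb in itertools.combinations(indexed_lst, r):
--             values = [value for idx, value in comb]
--             indexes = [idx for idx, value in comb]
--             result.append((values, indexes))
--     return result
-- ===== SOURCE B (Python) =====
-- def ordered_column_permutation(columns):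
--     """
--     Only match when column are spoken in order
--     @Output:
--     - list[Tuple[Tuple[match_word, index]]]
--     """
--     n = len(columns)
--
--     def choose(start, remaining):
--         # all (values, indexes) pairs for subsets of size `remaining`
--         # drawn in ascending index order from positions start..n-1
--         if remaining == 0:
--             return [([], [])]
--         out = []
--         for i in range(start, n - remaining + 1):
--             for vals, idxs in choose(i + 1, remaining - 1):
--                 out.append(([columns[i]] + vals, [i] + idxs))
--         return out
--
--     result = []
--     for r in range(1, n + 1):
--         result.extend(choose(0, r))
--     return result
-- ===== Notes on version B (the rewrite author's own statement) =====
-- stated objective: alternative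
-- what changed: Replaces itertools.combinations plus per-combination unzip comprehensions with a hand-written recursive generator choose(start, remaining) that walks the choice tree over index positions and builds the (values, indexes) pair directly during the recursion, with the range pruned to n - remaining + 1.
import Mathlib
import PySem

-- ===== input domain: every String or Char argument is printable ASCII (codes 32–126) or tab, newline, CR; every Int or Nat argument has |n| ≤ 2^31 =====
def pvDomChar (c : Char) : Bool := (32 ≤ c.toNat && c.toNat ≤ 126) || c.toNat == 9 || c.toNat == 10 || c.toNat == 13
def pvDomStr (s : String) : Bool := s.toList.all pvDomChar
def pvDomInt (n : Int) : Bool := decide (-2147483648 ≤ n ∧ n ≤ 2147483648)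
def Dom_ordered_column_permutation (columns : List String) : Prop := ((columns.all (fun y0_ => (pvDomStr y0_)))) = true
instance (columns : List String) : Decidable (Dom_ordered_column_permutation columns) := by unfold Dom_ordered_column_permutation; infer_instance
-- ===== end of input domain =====

-- B replaces itertools.combinations + unzip comprehensions by a recursive choice-tree
-- generator that builds the (values, indexes) pairs directly; alternative decomposition, not faster.

-- ===== PORT A =====
-- itertools.combinations(lst, r) in its exact emission order (subsets containing
-- earlier elements first, ascending index within each subset)
def pvCombs : Nat → List (Int × String) → List (List (Int × String))
  | 0, _ => [[]]
  | _ + 1, [] => []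
  | r + 1, x :: xs => (pvCombs r xs).map (fun c => x :: c) ++ pvCombs (r + 1) xs

def ordered_column_permutation (columns : List String) : List (List String × List Int) :=
  let indexed := PySem.List.enumerate columns 0
  (List.range columns.length).foldl (fun result r0 =>
    result ++ (pvCombs (r0 + 1) indexed).map
      (fun comb => (comb.map (fun p => p.2), comb.map (fun p => p.1)))) []

-- ===== PORT B =====
-- choose(start, remaining): (values, indexes) pairs for all size-`remaining` ascending
-- subsets of positions start..n-1 (range pruned at n - remaining + 1, as in Source B)
-- (arguments taken as (remaining, start) so the recursion is structural on remaining)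
def pvChoose (columns : List String) (n : Nat) : Nat → Nat → List (List String × List Int)
  | 0, _ => [([], [])]
  | rem + 1, start =>
    (List.range' start ((n - rem) - start)).flatMap (fun i =>
      (pvChoose columns n rem (i + 1)).map
        (fun p => (columns.getD i "" :: p.1, (i : Int) :: p.2)))

def ordered_column_permutation_alt (columns : List String) : List (List String × List Int) :=
  let n := columns.length
  (List.range n).foldl (fun result r0 => result ++ pvChoose columns n (r0 + 1) 0) []

-- ===== PRECONDITION & SPEC =====
def Spec_ordered_column_permutation (columns : List String) (out : List (List String × List Int)) : Prop := out = ordered_column_permutation_alt columns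
instance (columns : List String) (out : List (List String × List Int)) : Decidable (Spec_ordered_column_permutation columns out) := by unfold Spec_ordered_column_permutation; infer_instance

-- ===== CLAIM (what is proved, stated in full; the proofs are below) =====
def Claim_equal_ordered_column_permutation : Prop := ∀ (columns : List String), Dom_ordered_column_permutation columns → Spec_ordered_column_permutation columns (ordered_column_permutation columns)

-- ===== LEMMAS AND PROOFS =====

lemma pvCombs_nil_of_short (l : List (Int × String)) : ∀ r : Nat, l.length < r → pvCombs r l = [] := by
  induction l with
  | nil => intro r hr; cases r with
    | zero => omega
    | succ r => rfl
  | cons x xs ih =>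
    intro r hr
    cases r with
    | zero => omega
    | succ r =>
      simp only [pvCombs]
      have h1 : xs.length < r := by simp at hr; omega
      rw [ih r h1, ih (r + 1) (by omega)]
      rfl

-- key invariant: unzipping the combinations of the enumerated suffix starting at `start`
-- gives exactly B's choose(start, rem)
lemma pv_choose_eq (columns : List String) :
    ∀ (μ rem start : Nat), rem + (columns.length - start) ≤ μ →
      (pvCombs rem ((PySem.List.enumerate columns 0).drop start)).map
        (fun comb => (comb.map (fun p => p.2), comb.map (fun p => p.1)))
      = pvChoose columns columns.length rem start := by
  intro μ
  induction μ with
  | zero =>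
    intro rem start h
    have hrem : rem = 0 := by omega
    subst hrem
    simp [pvCombs, pvChoose]
  | succ μ ih =>
    intro rem start h
    cases rem with
    | zero => simp [pvCombs, pvChoose]
    | succ r =>
      by_cases hlt : start < columns.length - r
      · -- one element is available: peel it off
        have hsl : start < columns.length := by omega
        have hstart : start < (PySem.List.enumerate columns 0).length := by
          simpa [PySem.List.length_enumerate] using hsl
        have hdrop : (PySem.List.enumerate columns 0).drop start
            = ((0 : Int) + start, columns[start]) :: (PySem.List.enumerate columns 0).drop (start + 1) := by
          rw [List.drop_eq_getElem_cons hstart]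
          rw [PySem.List.getElem_enumerate]
        have hrange : List.range' start ((columns.length - r) - start)
            = start :: List.range' (start + 1) ((columns.length - r) - (start + 1)) := by
          have hc : (columns.length - r) - start = ((columns.length - r) - (start + 1)) + 1 := by omega
          rw [hc, List.range'_succ]
        rw [hdrop]
        conv_rhs => rw [pvChoose]
        rw [hrange, List.flatMap_cons]
        simp only [pvCombs, List.map_append, List.map_map]
        congr 1
        · rw [← ih r (start + 1) (by omega), List.map_map]
          apply List.map_congr_left
          intro c _
          simp [List.getD_eq_getElem?_getD, hsl]
        · rw [ih (r + 1) (start + 1) (by omega)]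
          conv_lhs => rw [pvChoose]
      · -- fewer than rem+1 positions remain: both sides are empty
        have hlen : ((PySem.List.enumerate columns 0).drop start).length < r + 1 := by
          simp [PySem.List.length_enumerate]; omega
        rw [pvCombs_nil_of_short _ _ hlen]
        conv_rhs => rw [pvChoose]
        have hz : (columns.length - r) - start = 0 := by omega
        rw [hz]
        rfl

lemma pv_main (columns : List String) :
    ordered_column_permutation columns = ordered_column_permutation_alt columns := by
  unfold ordered_column_permutation ordered_column_permutation_alt
  have hf : (fun (result : List (List String × List Int)) (r0 : Nat) =>
      result ++ (pvCombs (r0 + 1) (PySem.List.enumerate columns 0)).map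
        (fun comb => (comb.map (fun p => p.2), comb.map (fun p => p.1))))
      = (fun result r0 => result ++ pvChoose columns columns.length (r0 + 1) 0) := by
    funext result r0
    congr 1
    have := pv_choose_eq columns (r0 + 1 + columns.length) (r0 + 1) 0 (by omega)
    simpa using this
  simp only [hf]

-- ===== VERDICT (by name: the statement is the Claim_ definition above) =====
theorem ordered_column_permutation_spec : Claim_equal_ordered_column_permutation := by
  intro columns _
  unfold Spec_ordered_column_permutation
  exact pv_main columns
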